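-- pv_equiv track=rewrite | github.com/hannesbachmann/aoc_2023 | december_14.py | go_north
-- ===== SOURCE A (Python) =====
-- def go_north(input_lines):
--     input_lines = [[c for c in line] for line in input_lines]
--     for line in input_lines:
--         for n in range(len(line)):
--             for i in range(1, len(line)):
--                 if line[i-1] == '.' and (line[i] == 'O' or line[i].isdigit()):
--                     # swap
--                     tmp_l = line[i-1]
--                     line[i-1] = line[i]
--                     line[i] = tmp_l
--     return input_lines
-- ===== SOURCE B (Python) =====
-- def go_north(input_lines):
--     out = []
--     for line in input_lines:
--         res = []
--         dots = 0
--         for c in line: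
--             if c == '.':
--                 dots += 1
--             elif c == 'O' or c.isdigit():
--                 res.append(c)
--             else:
--                 res.extend(['.'] * dots)
--                 res.append(c)
--                 dots = 0
--         res.extend(['.'] * dots)
--         out.append(res)
--     return out
-- ===== Notes on version B (the rewrite author's own statement) =====
-- stated objective: faster
-- what changed: Replaces the per-line O(L^2) bubbling (L full passes of adjacent dot/rock swaps) by a single linear pass per line that buffers pending dots and flushes them at each barrier, emitting rocks immediately (stable partition per '#'-bounded segment).
import Mathlib
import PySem

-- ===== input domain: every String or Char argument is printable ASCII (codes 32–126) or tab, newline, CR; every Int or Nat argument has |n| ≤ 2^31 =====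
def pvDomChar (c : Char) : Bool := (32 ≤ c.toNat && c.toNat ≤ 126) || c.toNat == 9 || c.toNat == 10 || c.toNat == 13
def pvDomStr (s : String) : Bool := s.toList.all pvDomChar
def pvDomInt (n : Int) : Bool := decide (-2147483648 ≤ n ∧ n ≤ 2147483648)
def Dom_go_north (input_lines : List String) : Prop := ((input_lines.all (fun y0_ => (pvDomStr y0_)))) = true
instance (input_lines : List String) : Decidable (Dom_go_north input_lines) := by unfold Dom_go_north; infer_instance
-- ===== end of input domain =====

-- B rolls each line's rocks left in ONE pass (buffering dots, flushing them at each barrier) instead of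
-- A's len(line) full passes of adjacent swaps; same return value (A only mutates its own rebuilt copies).

-- ===== PORT A =====
-- the body of A's innermost loop: one conditional swap of line[i-1], line[i]
def pvStepA (l : List String) (i : Nat) : List String :=
  match l[i-1]?, l[i]? with
  | some a, some b =>
      if a = "." ∧ (b = "O" ∨ PySem.Str.strIsdigit b = true) then (l.set (i-1) b).set i a else l
  | _, _ => l

-- 'for i in range(1, len(line))'
def pvPassA (l : List String) : List String := (List.range' 1 (l.length - 1)).foldl pvStepA l
-- 'for n in range(len(line))'
def pvLineA (l : List String) : List String := (List.range l.length).foldl (fun acc _ => pvPassA acc) l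

def go_north (input_lines : List String) : List (List String) :=
  (input_lines.map (fun s => s.toList.map (fun c => String.ofList [c]))).map pvLineA

-- ===== PORT B =====
def pvStepB (acc : List String × Nat) (c : String) : List String × Nat :=
  if c = "." then (acc.1, acc.2 + 1)
  else if c = "O" ∨ PySem.Str.strIsdigit c = true then (acc.1 ++ [c], acc.2)
  else (acc.1 ++ List.replicate acc.2 "." ++ [c], 0)

def pvLineB (s : String) : List String :=
  let r := s.toList.foldl (fun acc c => pvStepB acc (String.ofList [c])) ([], 0)
  r.1 ++ List.replicate r.2 "."

def go_north_alt (input_lines : List String) : List (List String) := input_lines.map pvLineB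

-- ===== PRECONDITION & SPEC =====
def Spec_go_north (input_lines : List String) (out : List (List String)) : Prop := out = go_north_alt input_lines
instance (input_lines : List String) (out : List (List String)) : Decidable (Spec_go_north input_lines out) := by unfold Spec_go_north; infer_instance

-- ===== CLAIM (what is proved, stated in full; the proofs are below) =====
def Claim_equal_go_north : Prop := ∀ (input_lines : List String), Dom_go_north input_lines → Spec_go_north input_lines (go_north input_lines)

-- ===== LEMMAS AND PROOFS =====

def pvMovB (c : String) : Bool := c == "O" || PySem.Str.strIsdigit c
def pvGo : List String → List String
  | [] => []
  | [a] => [a]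
  | a :: b :: t =>
      if a = "." ∧ (b = "O" ∨ PySem.Str.strIsdigit b = true) then b :: pvGo (a :: t)
      else a :: pvGo (b :: t)
termination_by l => l.length
decreasing_by all_goals simp

theorem pvGo_subset (l : List String) : ∀ x ∈ pvGo l, x ∈ l := by
  induction l using pvGo.induct with
  | case1 => simp [pvGo]
  | case2 a => simp [pvGo]
  | case3 a b t h ih =>
    intro x hx
    rw [pvGo, if_pos h] at hx
    rcases List.mem_cons.1 hx with h1 | h1
    · simp [h1]
    · have := ih x h1
      rcases List.mem_cons.1 this with h2 | h2 <;> simp [h2]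
  | case4 a b t h ih =>
    intro x hx
    rw [pvGo, if_neg h] at hx
    rcases List.mem_cons.1 hx with h1 | h1
    · simp [h1]
    · have := ih x h1
      simp at this ⊢; tauto

theorem pvGo_filter (l : List String) : (pvGo l).filter pvMovB = l.filter pvMovB := by
  induction l using pvGo.induct with
  | case1 => simp [pvGo]
  | case2 a => simp [pvGo]
  | case3 a b t h ih =>
    obtain ⟨ha, hb⟩ := h
    have hmb : pvMovB b = true := by simp [pvMovB]; tauto
    have hma : pvMovB a = false := by simp [ha]; decide
    rw [pvGo, if_pos ⟨ha, hb⟩]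
    simp only [List.filter_cons, hmb, hma]
    simp only [List.filter_cons, hma] at ih
    simp [ih]
  | case4 a b t h ih =>
    rw [pvGo, if_neg h]
    simp only [List.filter_cons, ih]

theorem pvGo_count (l : List String) : (pvGo l).count "." = l.count "." := by
  induction l using pvGo.induct with
  | case1 => simp [pvGo]
  | case2 a => simp [pvGo]
  | case3 a b t h ih =>
    rw [pvGo, if_pos h]
    simp only [List.count_cons, ih]
    ring
  | case4 a b t h ih =>
    rw [pvGo, if_neg h]
    simp only [List.count_cons, ih]

theorem pvGo_cons_of_ne (b : String) (q : List String) (h : b ≠ ".") :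
    pvGo (b :: q) = b :: pvGo q := by
  cases q with
  | nil => simp [pvGo]
  | cons x q' => simp [pvGo, h]

theorem pvGo_nil : pvGo [] = [] := by simp [pvGo]
theorem pvGo_single (a : String) : pvGo [a] = [a] := by simp [pvGo]

def pvPureB (c : String) : Bool := c == "." || pvMovB c
def pvPure (l : List String) : Prop := ∀ c ∈ l, pvPureB c = true

theorem pvGo_append (p : List String) (b : String) (q : List String)
    (hp : pvPure p) (hb : pvPureB b = false) :
    pvGo (p ++ b :: q) = pvGo p ++ b :: pvGo q := by
  have hbd : b ≠ "." := by intro h; rw [h] at hb; simp [pvPureB] at hb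
  induction p using pvGo.induct with
  | case1 => simpa [pvGo_nil] using pvGo_cons_of_ne b q hbd
  | case2 a =>
    have hbm : ¬ (b = "O" ∨ PySem.Str.strIsdigit b = true) := by
      intro hcon
      have : pvMovB b = true := by simp [pvMovB]; tauto
      simp [pvPureB, this] at hb
    rw [List.cons_append, List.nil_append, pvGo_single, pvGo,
        if_neg (by tauto), pvGo_cons_of_ne b q hbd]
    rfl
  | case3 a c t h ih =>
    rw [List.cons_append, List.cons_append, pvGo, if_pos h, pvGo, if_pos h]
    have := ih (fun x hx => by
      rcases List.mem_cons.1 hx with h1 | h1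
      · rw [h1]; exact hp a (by simp)
      · exact hp x (by simp [h1]))
    rw [List.cons_append] at this
    rw [this]
    simp
  | case4 a c t h ih =>
    rw [List.cons_append, List.cons_append, pvGo, if_neg h, pvGo, if_neg h]
    have := ih (fun x hx => hp x (by simp at hx ⊢; tauto))
    rw [List.cons_append] at this
    rw [this]
    simp

theorem pvMovB_ne_dot (c : String) (h : pvMovB c = true) : c ≠ "." := by
  intro hc; rw [hc] at h; exact absurd h (by decide)

theorem pvGo_pure (l : List String) (h : pvPure l) : pvPure (pvGo l) := by
  intro c hc; exact h c (pvGo_subset l c hc)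

theorem pvGo_iter_pure (n : Nat) (l : List String) (h : pvPure l) : pvPure (pvGo^[n] l) := by
  induction n generalizing l with
  | zero => simpa using h
  | succ n ih => rw [Function.iterate_succ_apply]; exact ih _ (pvGo_pure _ h)

theorem pvGo_iter_append (n : Nat) (p : List String) (b : String) (q : List String)
    (hp : pvPure p) (hb : pvPureB b = false) :
    pvGo^[n] (p ++ b :: q) = pvGo^[n] p ++ b :: pvGo^[n] q := by
  induction n generalizing p q with
  | zero => simp
  | succ n ih =>
    rw [Function.iterate_succ_apply, Function.iterate_succ_apply,
        Function.iterate_succ_apply, pvGo_append p b q hp hb]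
    exact ih (pvGo p) (pvGo q) (pvGo_pure p hp)

def pvDb (k : Nat) : List String → List Nat
  | [] => []
  | c :: t => if c = "." then pvDb (k+1) t else if pvMovB c then k :: pvDb k t else pvDb k t

theorem pvDb_go (t : List String) (k : Nat) (hp : pvPure t)
    (hk : k = 0 ∨ t.head? = some ".") :
    pvDb k (pvGo t) = (pvDb k t).map (· - 1) := by
  induction t using pvGo.induct generalizing k with
  | case1 => simp [pvGo, pvDb]
  | case2 a =>
    rw [pvGo_single]
    by_cases ha : a = "."
    · simp [pvDb, ha]
    · by_cases hm : pvMovB a = true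
      · have hk0 : k = 0 := by
          rcases hk with h | h
          · exact h
          · simp at h; exact absurd h ha
        simp [pvDb, ha, hm, hk0]
      · simp [pvDb, ha, hm]
  | case3 a b t h ih =>
    obtain ⟨ha, hb⟩ := h
    have hmb : pvMovB b = true := by simp [pvMovB]; tauto
    have hbd : b ≠ "." := pvMovB_ne_dot b hmb
    rw [pvGo, if_pos ⟨ha, hb⟩]
    have hpat : pvPure (a :: t) := by
      intro x hx
      rcases List.mem_cons.1 hx with h1 | h1
      · rw [h1]; exact hp a (by simp)
      · exact hp x (by simp [h1])
    have := ih k hpat (Or.inr (by simp [ha]))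
    simp only [pvDb, hbd, hmb, if_neg hbd, if_pos hmb, ha, if_pos rfl] at *
    simp [this, List.map_cons]
  | case4 a b t h ih =>
    have hpbt : pvPure (b :: t) := fun x hx => hp x (by simp at hx ⊢; tauto)
    rw [pvGo, if_neg h]
    by_cases ha : a = "."
    · have hbdot : b = "." := by
        have := hp b (by simp)
        simp [pvPureB] at this
        rcases this with h1 | h1
        · exact h1
        · exfalso; apply h; refine ⟨ha, ?_⟩; simp [pvMovB] at h1; tauto
      have := ih (k+1) hpbt (Or.inr (by simp [hbdot]))
      simp only [pvDb, ha, if_pos rfl]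
      exact this
    · have hma : pvMovB a = true := by
        have := hp a (by simp); simp [pvPureB, ha] at this; exact this
      have hk0 : k = 0 := by
        rcases hk with h1 | h1
        · exact h1
        · simp at h1; exact absurd h1 ha
      have := ih 0 hpbt (Or.inl rfl)
      simp [pvDb, ha, hma, hk0, this]

theorem pvDb_mem_le (t : List String) (k : Nat) (x : Nat) (hx : x ∈ pvDb k t) :
    x ≤ k + t.count "." := by
  induction t generalizing k with
  | nil => simp [pvDb] at hx
  | cons c t ih =>
    simp only [pvDb] at hx
    by_cases hc : c = "."
    · rw [if_pos hc] at hx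
      have := ih (k+1) hx
      simp [List.count_cons, hc]
      omega
    · rw [if_neg hc] at hx
      have hcount : (c :: t).count "." = t.count "." := by simp [List.count_cons, hc]
      rw [hcount]
      by_cases hm : pvMovB c = true
      · rw [if_pos hm] at hx
        rcases List.mem_cons.1 hx with h1 | h1
        · omega
        · exact ih k h1
      · rw [if_neg hm] at hx
        exact ih k hx

theorem pvDb_mem_ge (t : List String) (k : Nat) (x : Nat) (hx : x ∈ pvDb k t) :
    k ≤ x := by
  induction t generalizing k with
  | nil => simp [pvDb] at hx
  | cons c t ih =>
    simp only [pvDb] at hx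
    split_ifs at hx
    · have := ih (k+1) hx; omega
    · rcases List.mem_cons.1 hx with h1 | h1
      · omega
      · exact ih k h1
    · exact ih k hx

theorem pvDb_length (t : List String) (k : Nat) :
    (pvDb k t).length = (t.filter pvMovB).length := by
  induction t generalizing k with
  | nil => simp [pvDb]
  | cons c t ih =>
    simp only [pvDb, List.filter_cons]
    by_cases hc : c = "."
    · subst hc
      simp [ih (k+1), show pvMovB "." = false from by decide]
    · by_cases hm : pvMovB c = true
      · simp [hc, hm, ih k]
      · simp [hc, hm, ih k]

theorem pvGo_iter_filter (n : Nat) (l : List String) :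
    (pvGo^[n] l).filter pvMovB = l.filter pvMovB := by
  induction n generalizing l with
  | zero => simp
  | succ n ih => rw [Function.iterate_succ_apply, ih, pvGo_filter]

theorem pvGo_iter_count (n : Nat) (l : List String) :
    (pvGo^[n] l).count "." = l.count "." := by
  induction n generalizing l with
  | zero => simp
  | succ n ih => rw [Function.iterate_succ_apply, ih, pvGo_count]

theorem pvDb_iter (n : Nat) (t : List String) (hp : pvPure t) :
    pvDb 0 (pvGo^[n] t) = (pvDb 0 t).map (· - n) := by
  induction n with
  | zero => simp
  | succ n ih =>
    rw [Function.iterate_succ_apply', pvDb_go _ 0 (pvGo_iter_pure n t hp) (Or.inl rfl), ih]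
    rw [List.map_map]
    apply List.map_congr_left
    intro x _
    simp
    omega

theorem pvAllDots (t : List String) (hp : pvPure t) (hf : t.filter pvMovB = []) :
    t = List.replicate (t.count ".") "." := by
  induction t with
  | nil => simp
  | cons c t ih =>
    have hc : c = "." := by
      have h1 := hp c (by simp)
      simp [pvPureB] at h1
      rcases h1 with h1 | h1
      · exact h1
      · exfalso; simp [List.filter_cons, h1] at hf
    have hm : pvMovB c = false := by rw [hc]; decide
    simp [List.filter_cons, hm] at hf
    have hf' : t.filter pvMovB = [] := List.filter_eq_nil_iff.2 (by intro a ha; simp [hf a ha])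
    have := ih (fun x hx => hp x (by simp [hx])) hf'
    simp [List.count_cons, hc, List.replicate_succ]
    exact this

theorem pvReconstruct (t : List String) (hp : pvPure t)
    (h0 : ∀ x ∈ pvDb 0 t, x = 0) :
    t = t.filter pvMovB ++ List.replicate (t.count ".") "." := by
  induction t with
  | nil => simp
  | cons c t ih =>
    have hpt : pvPure t := fun x hx => hp x (by simp [hx])
    by_cases hc : c = "."
    · have hm : pvMovB c = false := by rw [hc]; decide
      have hnil : pvDb 1 t = [] := by
        rw [List.eq_nil_iff_forall_not_mem]
        intro x hx
        have h1 := pvDb_mem_ge t 1 x hx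
        have h2 : x = 0 := h0 x (by simp [pvDb, hc, hx])
        omega
      have hflen : t.filter pvMovB = [] := by
        have := pvDb_length t 1
        rw [hnil] at this
        exact List.length_eq_zero_iff.1 this.symm
      have hdots := pvAllDots t hpt hflen
      rw [List.filter_cons, if_neg (by simp [hm])]
      rw [hflen, List.nil_append, List.count_cons, if_pos (by simp [hc])]
      subst hc
      rw [List.replicate_succ]
      exact congrArg ("." :: ·) hdots
    · have hm : pvMovB c = true := by
        have := hp c (by simp); simp [pvPureB, hc] at this; exact this
      have h0t : ∀ x ∈ pvDb 0 t, x = 0 := by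
        intro x hx
        exact h0 x (by simp [pvDb, hc, hm, hx])
      have := ih hpt h0t
      rw [List.filter_cons, if_pos hm, List.count_cons, if_neg (by simp [hc])]
      rw [List.cons_append]
      exact congrArg (c :: ·) this

theorem pvPureMain (t : List String) (n : Nat) (hp : pvPure t) (hn : t.length ≤ n) :
    pvGo^[n] t = t.filter pvMovB ++ List.replicate (t.count ".") "." := by
  have hpure := pvGo_iter_pure n t hp
  have h0 : ∀ x ∈ pvDb 0 (pvGo^[n] t), x = 0 := by
    intro x hx
    rw [pvDb_iter n t hp] at hx
    obtain ⟨y, hy, rfl⟩ := List.mem_map.1 hx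
    have h1 := pvDb_mem_le t 0 y hy
    have h2 : t.count "." ≤ t.length := List.count_le_length
    omega
  have hrec := pvReconstruct _ hpure h0
  rw [hrec, pvGo_iter_filter, pvGo_iter_count]

def pvBcore (l : List String) : List String :=
  let r := l.foldl pvStepB ([], 0)
  r.1 ++ List.replicate r.2 "."

theorem pvFoldB_pure (p : List String) (res : List String) (d : Nat) (hp : pvPure p) :
    p.foldl pvStepB (res, d) = (res ++ p.filter pvMovB, d + p.count ".") := by
  induction p generalizing res d with
  | nil => simp
  | cons c p ih =>
    have hpt : pvPure p := fun x hx => hp x (by simp [hx])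
    rw [List.foldl_cons]
    by_cases hc : c = "."
    · have hm : pvMovB c = false := by rw [hc]; decide
      rw [show pvStepB (res, d) c = (res, d + 1) from by unfold pvStepB; rw [if_pos hc]]
      rw [ih res (d+1) hpt]
      simp only [List.filter_cons, List.count_cons, hc, hm, Prod.ext_iff]
      refine ⟨by simp [show pvMovB "." = false from by decide], by simp [hc]; omega⟩
    · have hm : pvMovB c = true := by
        have := hp c (by simp); simp [pvPureB, hc] at this; exact this
      have hcond : c = "O" ∨ PySem.Str.strIsdigit c = true := by simp [pvMovB] at hm; tauto
      rw [show pvStepB (res, d) c = (res ++ [c], d) from by unfold pvStepB; rw [if_neg hc, if_pos hcond]]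
      rw [ih (res ++ [c]) d hpt]
      simp [List.filter_cons, List.count_cons, hc, hm]

theorem pvFoldB_shift (q : List String) (res : List String) (d : Nat) :
    q.foldl pvStepB (res, d) =
      (res ++ (q.foldl pvStepB ([], d)).1, (q.foldl pvStepB ([], d)).2) := by
  induction q generalizing res d with
  | nil => simp
  | cons c q ih =>
    rw [List.foldl_cons, List.foldl_cons]
    by_cases hc : c = "."
    · rw [show pvStepB (res, d) c = (res, d + 1) from by unfold pvStepB; rw [if_pos hc],
          show pvStepB (([] : List String), d) c = ([], d + 1) from by unfold pvStepB; rw [if_pos hc]]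
      exact ih res (d+1)
    · by_cases hcond : c = "O" ∨ PySem.Str.strIsdigit c = true
      · rw [show pvStepB (res, d) c = (res ++ [c], d) from by unfold pvStepB; rw [if_neg hc, if_pos hcond],
            show pvStepB (([] : List String), d) c = ([c], d) from by unfold pvStepB; rw [if_neg hc, if_pos hcond]; rfl]
        rw [ih (res ++ [c]) d, ih [c] d]
        simp
      · rw [show pvStepB (res, d) c = (res ++ List.replicate d "." ++ [c], 0) from by
              unfold pvStepB; rw [if_neg hc, if_neg hcond],
            show pvStepB (([] : List String), d) c = (List.replicate d "." ++ [c], 0) from by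
              unfold pvStepB; rw [if_neg hc, if_neg hcond]; rfl]
        rw [ih (res ++ List.replicate d "." ++ [c]) 0, ih (List.replicate d "." ++ [c]) 0]
        simp

theorem pvStepA_at (pre : List String) (a b : String) (t : List String) :
    pvStepA (pre ++ a :: b :: t) (pre.length + 1) =
      if a = "." ∧ (b = "O" ∨ PySem.Str.strIsdigit b = true) then pre ++ b :: a :: t
      else pre ++ a :: b :: t := by
  have h1 : (pre ++ a :: b :: t)[pre.length + 1 - 1]? = some a := by
    rw [show pre.length + 1 - 1 = pre.length from rfl]
    rw [List.getElem?_append_right (le_refl _)]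
    simp
  have h2 : (pre ++ a :: b :: t)[pre.length + 1]? = some b := by
    rw [List.getElem?_append_right (by omega)]
    simp [show pre.length + 1 - pre.length = 1 from by omega]
  simp only [pvStepA, h1, h2]
  split_ifs with hc
  · rw [show pre.length + 1 - 1 = pre.length from rfl]
    rw [show (pre ++ a :: b :: t).set pre.length b = pre ++ b :: b :: t from by simp]
    rw [show (pre ++ b :: b :: t).set (pre.length + 1) a = pre ++ b :: a :: t from by simp [List.set]]
  · rfl

theorem pvFoldA (rest pre : List String) :
    (List.range' (pre.length + 1) (rest.length - 1)).foldl pvStepA (pre ++ rest) = pre ++ pvGo rest := by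
  induction rest using pvGo.induct generalizing pre with
  | case1 => simp [pvGo]
  | case2 a => simp [pvGo]
  | case3 a b t h ih =>
    rw [show (a :: b :: t).length - 1 = t.length + 1 from by simp]
    rw [List.range'_succ, List.foldl_cons, pvStepA_at, if_pos h]
    rw [pvGo, if_pos h]
    have := ih (pre ++ [b])
    rw [show ((a :: t).length - 1) = t.length from by simp] at this
    rw [show (pre ++ [b]).length + 1 = pre.length + 1 + 1 from by simp] at this
    rw [show (pre ++ [b]) ++ a :: t = pre ++ b :: a :: t from by simp] at this
    rw [this]
    simp
  | case4 a b t h ih =>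
    rw [show (a :: b :: t).length - 1 = t.length + 1 from by simp]
    rw [List.range'_succ, List.foldl_cons, pvStepA_at, if_neg h]
    rw [pvGo, if_neg h]
    have := ih (pre ++ [a])
    rw [show ((b :: t).length - 1) = t.length from by simp] at this
    rw [show (pre ++ [a]).length + 1 = pre.length + 1 + 1 from by simp] at this
    rw [show (pre ++ [a]) ++ b :: t = pre ++ a :: b :: t from by simp] at this
    rw [this]
    simp

theorem pvPassA_eq_go (l : List String) : pvPassA l = pvGo l := by
  have h := pvFoldA l []
  simpa [pvPassA] using h

theorem pvFoldRangeIgnore {α : Type} (f : α → α) (n : Nat) (x : α) :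
    (List.range n).foldl (fun acc _ => f acc) x = f^[n] x := by
  induction n generalizing x with
  | zero => simp
  | succ n ih =>
    rw [List.range_succ, List.foldl_append, ih, List.foldl_cons, List.foldl_nil,
        Function.iterate_succ_apply']

theorem pvLineA_eq_iterate (l : List String) : pvLineA l = pvGo^[l.length] l := by
  unfold pvLineA
  rw [show (fun (acc : List String) (_ : Nat) => pvPassA acc) = (fun acc _ => pvGo acc) from by
        funext acc i; exact pvPassA_eq_go acc]
  exact pvFoldRangeIgnore pvGo l.length l

theorem pvDropWhileHead {α : Type} (p : α → Bool) (l : List α) (b : α) (q : List α)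
    (h : l.dropWhile p = b :: q) : p b = false := by
  induction l with
  | nil => simp [List.dropWhile] at h
  | cons c t ih =>
    rw [List.dropWhile_cons] at h
    by_cases hc : p c = true
    · rw [if_pos hc] at h; exact ih h
    · rw [if_neg hc] at h
      cases h
      simpa using hc

theorem pvGo_iter_nil (n : Nat) : pvGo^[n] ([] : List String) = [] := by
  induction n with
  | zero => simp
  | succ n ih => rw [Function.iterate_succ_apply, pvGo_nil, ih]

theorem pvCentralAux (m : Nat) : ∀ (l : List String) (n : Nat),
    l.length ≤ m → l.length ≤ n → pvGo^[n] l = pvBcore l := by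
  induction m with
  | zero =>
    intro l n h1 _
    have : l = [] := List.eq_nil_of_length_eq_zero (by omega)
    subst this
    rw [pvGo_iter_nil]
    rfl
  | succ m ih =>
    intro l n h1 h2
    cases hdrop : l.dropWhile pvPureB with
    | nil =>
      have hl : pvPure l := by
        intro x hx
        have hx' : x ∈ l.takeWhile pvPureB := by
          rw [← List.takeWhile_append_dropWhile (p := pvPureB) (l := l), hdrop,
              List.append_nil] at hx
          exact hx
        exact List.mem_takeWhile_imp hx'
      rw [pvPureMain l n hl h2]
      unfold pvBcore
      rw [pvFoldB_pure l [] 0 hl]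
      simp
    | cons b q =>
      have hb : pvPureB b = false := pvDropWhileHead pvPureB l b q hdrop
      have hbd : b ≠ "." := by intro hh; rw [hh] at hb; simp [pvPureB] at hb
      have hbm : ¬ (b = "O" ∨ PySem.Str.strIsdigit b = true) := by
        intro hh
        have : pvMovB b = true := by simp [pvMovB]; tauto
        simp [pvPureB, this] at hb
      have hpp : pvPure (l.takeWhile pvPureB) := fun x hx => List.mem_takeWhile_imp hx
      have hdecomp : l = l.takeWhile pvPureB ++ b :: q := by
        conv_lhs => rw [← List.takeWhile_append_dropWhile (p := pvPureB) (l := l)]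
        rw [hdrop]
      have hlen : l.length = (l.takeWhile pvPureB).length + 1 + q.length := by
        conv_lhs => rw [hdecomp]
        simp
        omega
      have hq : pvGo^[n] q = pvBcore q := ih q n (by omega) (by omega)
      have htw : pvGo^[n] (l.takeWhile pvPureB) =
          (l.takeWhile pvPureB).filter pvMovB ++
            List.replicate ((l.takeWhile pvPureB).count ".") "." :=
        pvPureMain _ n hpp (by omega)
      conv_lhs => rw [hdecomp]
      rw [pvGo_iter_append n _ b q hpp hb, hq, htw]
      conv_rhs => rw [hdecomp]
      unfold pvBcore
      rw [List.foldl_append, pvFoldB_pure _ [] 0 hpp, List.foldl_cons]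
      rw [show pvStepB ([] ++ (l.takeWhile pvPureB).filter pvMovB, 0 + (l.takeWhile pvPureB).count ".") b
            = ((l.takeWhile pvPureB).filter pvMovB ++ List.replicate ((l.takeWhile pvPureB).count ".") "." ++ [b], 0) from by
          unfold pvStepB; rw [if_neg hbd, if_neg hbm]; simp]
      have hshift := pvFoldB_shift q
        ((l.takeWhile pvPureB).filter pvMovB ++ List.replicate ((l.takeWhile pvPureB).count ".") "." ++ [b]) 0
      rw [hshift]
      simp [pvBcore]

theorem pvCentral (l : List String) (n : Nat) (hn : l.length ≤ n) :
    pvGo^[n] l = pvBcore l :=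
  pvCentralAux l.length l n (le_refl _) hn


-- ===== VERDICT (by name: the statement is the Claim_ definition above) =====
theorem go_north_spec : Claim_equal_go_north := by
  intro input_lines _
  unfold Spec_go_north go_north go_north_alt
  rw [List.map_map]
  apply List.map_congr_left
  intro s _
  show pvLineA (s.toList.map (fun c => String.ofList [c])) = pvLineB s
  rw [pvLineA_eq_iterate, pvCentral _ _ (le_refl _)]
  simp [pvBcore, pvLineB, List.foldl_map]
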